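-- pv_equiv track=rewrite | github.com/Elysia-Jewel/LeetCode | 649.py | predictPartyVictory2
-- ===== SOURCE A (Python) =====
-- from collections import deque
--
-- def predictPartyVictory2(senate: str) -> str:
--         # O(n) time and space
--         r_positions = deque([i for i, s in enumerate(senate) if s == 'R'])
--         d_positions = deque([i for i, s in enumerate(senate) if s == 'D'])
--         next_position = len(senate)
--         while r_positions and d_positions:
--             if r_positions[0] < d_positions[0]:
--                 r_positions.append(next_position)
--             else:
--                 d_positions.append(next_position)
--             r_positions.popleft()
--             d_positions.popleft()
--             next_position += 1
--         return 'Radiant' if r_positions else 'Dire'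
-- ===== SOURCE B (Python) =====
-- def predictPartyVictory2(senate: str) -> str:
--     # Simpler single-list round-robin: pop the front senator, who bans the
--     # earliest senator of the opposing party, and goes to the back of the line.
--     q = [c for c in senate if c in 'RD']
--     while 'R' in q and 'D' in q:
--         h = q.pop(0)
--         q.remove('D' if h == 'R' else 'R')
--         q.append(h)
--     return 'Radiant' if 'R' in q else 'Dire'
-- ===== Notes on version B (the rewrite author's own statement) =====
-- stated objective: simpler
-- what changed: Replaces the two sorted index deques plus a fresh-position counter by a single round-robin list of party characters: the front senator removes the first opposing senator and is re-enqueued, so no positions are ever materialised or compared.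
import Mathlib
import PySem

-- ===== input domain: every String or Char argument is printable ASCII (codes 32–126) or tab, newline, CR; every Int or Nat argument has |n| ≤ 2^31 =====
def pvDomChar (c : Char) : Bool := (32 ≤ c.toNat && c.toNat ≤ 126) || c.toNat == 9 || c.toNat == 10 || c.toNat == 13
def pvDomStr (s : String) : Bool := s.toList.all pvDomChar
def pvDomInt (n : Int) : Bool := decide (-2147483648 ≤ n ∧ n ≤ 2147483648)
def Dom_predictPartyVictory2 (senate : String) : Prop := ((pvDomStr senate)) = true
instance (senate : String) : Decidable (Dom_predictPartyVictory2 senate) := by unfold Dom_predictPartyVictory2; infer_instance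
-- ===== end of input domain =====

-- B replaces A's two sorted index deques + fresh-position counter by a single
-- round-robin list of party characters (objective: simpler; B is O(n^2) worst case vs A's O(n)).

-- ===== PORT A =====
-- the while loop over the two position deques; each iteration pops both fronts and appends one
def pvA_loop : List Int → List Int → Int → String
  | [], _, _ => "Dire"
  | _ :: _, [], _ => "Radiant"
  | r0 :: rt, d0 :: dt, n =>
      if r0 < d0 then pvA_loop (rt ++ [n]) dt (n + 1)
      else pvA_loop rt (dt ++ [n]) (n + 1)
termination_by r d _ => r.length + d.length
decreasing_by all_goals (simp [List.length_append]; try omega)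

def predictPartyVictory2 (senate : String) : String :=
  let r := ((PySem.List.enumerate senate.toList).filter (fun p => p.2 == 'R')).map (fun p => p.1)
  let d := ((PySem.List.enumerate senate.toList).filter (fun p => p.2 == 'D')).map (fun p => p.1)
  pvA_loop r d (PySem.Str.len senate)

-- ===== PORT B =====
-- the while loop over the single round-robin list; q.remove is exact as List.erase here
-- because the loop guard guarantees the opposing party is present behind the front senator
def pvB_loop : List Char → String
  | [] => "Dire"
  | c :: t =>
      if h : ('R' ∈ c :: t) ∧ ('D' ∈ c :: t) then
        pvB_loop (t.erase (if c = 'R' then 'D' else 'R') ++ [c])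
      else if 'R' ∈ c :: t then "Radiant" else "Dire"
termination_by q => q.length
decreasing_by
  have hmem : (if c = 'R' then 'D' else 'R') ∈ t := by
    by_cases hc : c = 'R'
    · simp only [if_pos hc]
      rcases List.mem_cons.mp h.2 with h2 | h2
      · exact absurd (hc ▸ h2) (by decide)
      · exact h2
    · simp only [if_neg hc]
      rcases List.mem_cons.mp h.1 with h1 | h1
      · exact absurd h1.symm hc
      · exact h1
  have := List.length_erase_of_mem hmem
  have hpos : 0 < t.length := List.length_pos_of_mem hmem
  simp only [List.length_append, List.length_cons, List.length_nil, dite_eq_ite]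
  omega

def predictPartyVictory2_alt (senate : String) : String :=
  pvB_loop (senate.toList.filter (fun c => c == 'R' || c == 'D'))

-- ===== PRECONDITION & SPEC =====
def Spec_predictPartyVictory2 (senate : String) (out : String) : Prop := out = predictPartyVictory2_alt senate
instance (senate : String) (out : String) : Decidable (Spec_predictPartyVictory2 senate out) := by unfold Spec_predictPartyVictory2; infer_instance

-- ===== CLAIM (what is proved, stated in full; the proofs are below) =====
def Claim_equal_predictPartyVictory2 : Prop := ∀ (senate : String), Dom_predictPartyVictory2 senate → Spec_predictPartyVictory2 senate (predictPartyVictory2 senate)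

-- ===== LEMMAS AND PROOFS =====

-- the merged sequence of parties in position order, from the two sorted position lists
def pvMerge : List Int → List Int → List Char
  | [], d => d.map (fun _ => 'D')
  | _ :: rt, [] => 'R' :: pvMerge rt []
  | r0 :: rt, d0 :: dt =>
      if r0 < d0 then 'R' :: pvMerge rt (d0 :: dt) else 'D' :: pvMerge (r0 :: rt) dt
termination_by r d => r.length + d.length



theorem pvMerge_mem_R (r d : List Int) : 'R' ∈ pvMerge r d ↔ r ≠ [] := by
  induction r, d using pvMerge.induct with
  | case1 d => simp [pvMerge]
  | case2 r0 rt ih => simp [pvMerge]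
  | case3 r0 rt d0 dt hc ih => rw [pvMerge, if_pos hc]; simp_all
  | case4 r0 rt d0 dt hc ih => rw [pvMerge, if_neg (by omega)]; simp_all

theorem pvMerge_mem_D (r d : List Int) : 'D' ∈ pvMerge r d ↔ d ≠ [] := by
  induction r, d using pvMerge.induct with
  | case1 d => cases d <;> simp [pvMerge]
  | case2 r0 rt ih => simp_all [pvMerge]
  | case3 r0 rt d0 dt hc ih => rw [pvMerge, if_pos hc]; simp_all
  | case4 r0 rt d0 dt hc ih => rw [pvMerge, if_neg (by omega)]; simp_all

theorem pvMerge_erase_D (r : List Int) (d0 : Int) (dt : List Int)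
    (h : ∀ x ∈ dt, d0 < x) : (pvMerge r (d0 :: dt)).erase 'D' = pvMerge r dt := by
  induction r with
  | nil => simp [pvMerge]
  | cons r0 rt ih =>
    by_cases hc : r0 < d0
    · rw [pvMerge, if_pos hc, List.erase_cons_tail (by decide), ih]
      cases dt with
      | nil => rw [pvMerge]
      | cons d1 dt' => rw [pvMerge, if_pos (lt_trans hc (h d1 (by simp)))]
    · rw [pvMerge, if_neg hc, List.erase_cons_head]

theorem pvMerge_erase_R (r0 : Int) (rt d : List Int)
    (h : ∀ x ∈ rt, r0 < x) : (pvMerge (r0 :: rt) d).erase 'R' = pvMerge rt d := by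
  induction d with
  | nil => rw [pvMerge, List.erase_cons_head]
  | cons d0 dt ih =>
    by_cases hc : r0 < d0
    · rw [pvMerge, if_pos hc, List.erase_cons_head]
    · rw [pvMerge, if_neg hc, List.erase_cons_tail (by decide), ih]
      cases rt with
      | nil => simp [pvMerge]
      | cons r1 rt' =>
        rw [pvMerge, if_neg (by have := h r1 (by simp); omega)]

theorem pvMerge_nil_append_R (d : List Int) (n : Int) (hd : ∀ x ∈ d, x < n) :
    pvMerge [n] d = d.map (fun _ => 'D') ++ ['R'] := by
  induction d with
  | nil => simp [pvMerge]
  | cons d0 dt ih =>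
    rw [pvMerge, if_neg (by have := hd d0 (by simp); omega),
      ih (fun x hx => hd x (by simp [hx]))]
    simp

theorem pvMerge_nil_append_D (r : List Int) (n : Int) (hr : ∀ x ∈ r, x < n) :
    pvMerge r [n] = r.map (fun _ => 'R') ++ ['D'] := by
  induction r with
  | nil => simp [pvMerge]
  | cons r0 rt ih =>
    rw [pvMerge, if_pos (hr r0 (by simp)), ih (fun x hx => hr x (by simp [hx]))]
    simp

theorem pvMerge_nil_eq (d : List Int) : pvMerge [] d = d.map (fun _ => 'D') := by
  rw [pvMerge]

theorem pvMerge_nil_right_eq (r : List Int) : pvMerge r [] = r.map (fun _ => 'R') := by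
  induction r with
  | nil => rw [pvMerge]; simp
  | cons r0 rt ih => rw [pvMerge, ih]; simp

theorem pvMerge_append_R (r d : List Int) (n : Int) :
    (∀ x ∈ r, x < n) → (∀ x ∈ d, x < n) →
    pvMerge (r ++ [n]) d = pvMerge r d ++ ['R'] := by
  induction r, d using pvMerge.induct with
  | case1 d =>
    intro _ hd
    rw [List.nil_append, pvMerge_nil_append_R d n hd, pvMerge_nil_eq]
  | case2 r0 rt ih =>
    intro hr _
    rw [List.cons_append, pvMerge, pvMerge,
      ih (fun x hx => hr x (by simp [hx])) (by simp)]
    simp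
  | case3 r0 rt d0 dt hc ih =>
    intro hr hd
    rw [List.cons_append, pvMerge, if_pos hc, pvMerge, if_pos hc,
      ih (fun x hx => hr x (by simp [hx])) hd]
    simp
  | case4 r0 rt d0 dt hc ih =>
    intro hr hd
    rw [List.cons_append, pvMerge, if_neg hc, pvMerge, if_neg hc, ← List.cons_append,
      ih hr (fun x hx => hd x (by simp [hx]))]
    simp

theorem pvMerge_append_D (r d : List Int) (n : Int) :
    (∀ x ∈ r, x < n) → (∀ x ∈ d, x < n) →
    pvMerge r (d ++ [n]) = pvMerge r d ++ ['D'] := by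
  induction r, d using pvMerge.induct with
  | case1 d =>
    intro _ _
    rw [pvMerge_nil_eq, pvMerge_nil_eq]
    simp
  | case2 r0 rt ih =>
    intro hr _
    rw [List.nil_append, pvMerge_nil_append_D _ n hr, pvMerge_nil_right_eq]
  | case3 r0 rt d0 dt hc ih =>
    intro hr hd
    rw [List.cons_append, pvMerge, if_pos hc, ← List.cons_append,
      ih (fun x hx => hr x (by simp [hx])) hd, pvMerge, if_pos hc]
    simp
  | case4 r0 rt d0 dt hc ih =>
    intro hr hd
    rw [List.cons_append, pvMerge, if_neg hc, pvMerge, if_neg hc,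
      ih hr (fun x hx => hd x (by simp [hx]))]
    simp

theorem pvMerge_cons_R_of_lt (r0 : Int) (rt d : List Int)
    (h : ∀ x ∈ d, r0 < x) : pvMerge (r0 :: rt) d = 'R' :: pvMerge rt d := by
  cases d with
  | nil => rw [pvMerge]
  | cons d0 dt => rw [pvMerge, if_pos (h d0 (by simp))]

theorem pvMerge_cons_D_of_lt (r : List Int) (d0 : Int) (dt : List Int)
    (h : ∀ x ∈ r, d0 < x) : pvMerge r (d0 :: dt) = 'D' :: pvMerge r dt := by
  cases r with
  | nil => simp [pvMerge_nil_eq]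
  | cons r0 rt => rw [pvMerge, if_neg (by have := h r0 (by simp); omega)]

theorem pvA_eq_pvB (N : Nat) : ∀ (r d : List Int) (n : Int),
    r.length + d.length ≤ N →
    (∀ x ∈ r, x < n) → (∀ x ∈ d, x < n) →
    List.Pairwise (· < ·) r → List.Pairwise (· < ·) d →
    pvA_loop r d n = pvB_loop (pvMerge r d) := by
  induction N with
  | zero =>
    intro r d n hN _ _ _ _
    have hr : r = [] := by cases r <;> simp_all
    subst hr
    have hd : d = [] := by cases d <;> simp_all
    subst hd
    rw [pvA_loop, pvMerge]; simp [pvB_loop]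
  | succ N ih =>
    intro r d n hN hrn hdn hrp hdp
    match r, d with
    | [], d =>
      rw [pvA_loop, pvMerge]
      cases d with
      | nil => simp [pvB_loop]
      | cons d0 dt =>
        rw [List.map_cons, pvB_loop]
        rw [dif_neg (by simp)]
        rw [if_neg (by simp)]
    | r0 :: rt, [] =>
      rw [pvA_loop, pvMerge, pvB_loop]
      rw [dif_neg (by
        have := (pvMerge_mem_D rt []).not
        simp_all)]
      simp
    | r0 :: rt, d0 :: dt =>
      have hDdt : ∀ x ∈ dt, d0 < x := by
        intro x hx; exact (List.pairwise_cons.mp hdp).1 x hx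
      have hRrt : ∀ x ∈ rt, r0 < x := by
        intro x hx; exact (List.pairwise_cons.mp hrp).1 x hx
      by_cases hc : r0 < d0
      · rw [pvA_loop, if_pos hc]
        have hm : pvMerge (r0 :: rt) (d0 :: dt) = 'R' :: pvMerge rt (d0 :: dt) := by
          rw [pvMerge, if_pos hc]
        rw [hm, pvB_loop]
        rw [dif_pos ⟨by simp, by
          have : 'D' ∈ pvMerge rt (d0 :: dt) := (pvMerge_mem_D rt (d0 :: dt)).mpr (by simp)
          simp [this]⟩]
        have he : (pvMerge rt (d0 :: dt)).erase 'D' = pvMerge rt dt :=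
          pvMerge_erase_D rt d0 dt hDdt
        simp only [reduceIte]
        rw [he]
        rw [← pvMerge_append_R rt dt n (fun x hx => hrn x (by simp [hx]))
              (fun x hx => hdn x (by simp [hx]))]
        refine ih (rt ++ [n]) dt (n + 1) (by simp at hN ⊢; omega) ?_ ?_ ?_ ?_
        · intro x hx
          rcases List.mem_append.mp hx with hx | hx
          · have := hrn x (by simp [hx]); omega
          · simp at hx; omega
        · intro x hx; have := hdn x (by simp [hx]); omega
        · refine List.pairwise_append.mpr ⟨(List.pairwise_cons.mp hrp).2, by simp, ?_⟩
          intro x hx y hy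
          simp at hy; subst hy
          exact hrn x (by simp [hx])
        · exact (List.pairwise_cons.mp hdp).2
      · rw [pvA_loop, if_neg hc]
        have hm : pvMerge (r0 :: rt) (d0 :: dt) = 'D' :: pvMerge (r0 :: rt) dt := by
          rw [pvMerge, if_neg hc]
        rw [hm, pvB_loop]
        rw [dif_pos ⟨by
          have : 'R' ∈ pvMerge (r0 :: rt) dt := (pvMerge_mem_R (r0 :: rt) dt).mpr (by simp)
          simp [this], by simp⟩]
        have he : (pvMerge (r0 :: rt) dt).erase 'R' = pvMerge rt dt :=
          pvMerge_erase_R r0 rt dt hRrt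
        rw [if_neg (by decide : ¬('D' : Char) = 'R'), he]
        rw [← pvMerge_append_D rt dt n (fun x hx => hrn x (by simp [hx]))
              (fun x hx => hdn x (by simp [hx]))]
        refine ih rt (dt ++ [n]) (n + 1) (by simp at hN ⊢; omega) ?_ ?_ ?_ ?_
        · intro x hx; have := hrn x (by simp [hx]); omega
        · intro x hx
          rcases List.mem_append.mp hx with hx | hx
          · have := hdn x (by simp [hx]); omega
          · simp at hx; omega
        · exact (List.pairwise_cons.mp hrp).2
        · refine List.pairwise_append.mpr ⟨(List.pairwise_cons.mp hdp).2, by simp, ?_⟩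
          intro x hx y hy
          simp at hy; subst hy
          exact hdn x (by simp [hx])

theorem pvIdx_bounds (ch : Char) (cs : List Char) (k : Int) :
    ∀ x ∈ ((PySem.List.enumerate cs k).filter (fun p => p.2 == ch)).map (fun p => p.1),
      k ≤ x ∧ x < k + cs.length := by
  intro x hx
  simp only [List.mem_map, List.mem_filter] at hx
  obtain ⟨p, ⟨hp, _⟩, rfl⟩ := hx
  rw [PySem.List.mem_enumerate_iff] at hp
  obtain ⟨j, hj, rfl⟩ := hp
  constructor <;> simp <;> omega

theorem pvIdx_sorted (ch : Char) (cs : List Char) (k : Int) :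
    List.Pairwise (· < ·)
      (((PySem.List.enumerate cs k).filter (fun p => p.2 == ch)).map (fun p => p.1)) := by
  rw [List.pairwise_map]
  exact List.Pairwise.sublist List.filter_sublist (PySem.List.pairwise_lt_enumerate ..)

theorem pvIdx_eq (cs : List Char) (k : Int) :
    pvMerge (((PySem.List.enumerate cs k).filter (fun p => p.2 == 'R')).map (fun p => p.1))
            (((PySem.List.enumerate cs k).filter (fun p => p.2 == 'D')).map (fun p => p.1))
      = cs.filter (fun c => c == 'R' || c == 'D') := by
  induction cs generalizing k with
  | nil => simp [PySem.List.enumerate_nil, pvMerge]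
  | cons c cs ih =>
    rw [PySem.List.enumerate_cons]
    by_cases hR : c = 'R'
    · subst hR
      simp only [List.filter_cons]
      simp
      rw [pvMerge_cons_R_of_lt _ _ _ (fun x hx => by
        have := (pvIdx_bounds 'D' cs (k + 1) x hx).1; omega)]
      rw [ih (k + 1)]
    · by_cases hD : c = 'D'
      · subst hD
        simp only [List.filter_cons]
        simp
        rw [pvMerge_cons_D_of_lt _ _ _ (fun x hx => by
          have := (pvIdx_bounds 'R' cs (k + 1) x hx).1; omega)]
        rw [ih (k + 1)]
      · simp only [List.filter_cons]
        simp [hR, hD]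
        rw [ih (k + 1)]

-- ===== VERDICT (by name: the statement is the Claim_ definition above) =====
theorem predictPartyVictory2_spec : Claim_equal_predictPartyVictory2 := by
  intro senate _
  unfold Spec_predictPartyVictory2 predictPartyVictory2 predictPartyVictory2_alt
  show pvA_loop
      (((PySem.List.enumerate senate.toList 0).filter (fun p => p.2 == 'R')).map (fun p => p.1))
      (((PySem.List.enumerate senate.toList 0).filter (fun p => p.2 == 'D')).map (fun p => p.1))
      (PySem.Str.len senate)
    = pvB_loop (senate.toList.filter (fun c => c == 'R' || c == 'D'))
  rw [pvA_eq_pvB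
      ((((PySem.List.enumerate senate.toList 0).filter (fun p => p.2 == 'R')).map (fun p => p.1)).length
        + (((PySem.List.enumerate senate.toList 0).filter (fun p => p.2 == 'D')).map (fun p => p.1)).length)
      _ _ _ le_rfl
      (fun x hx => by
        have h2 := (pvIdx_bounds 'R' senate.toList 0 x hx).2
        simp only [zero_add] at h2
        simpa [PySem.Str.len_eq] using h2)
      (fun x hx => by
        have h2 := (pvIdx_bounds 'D' senate.toList 0 x hx).2
        simp only [zero_add] at h2
        simpa [PySem.Str.len_eq] using h2)
      (pvIdx_sorted 'R' senate.toList 0) (pvIdx_sorted 'D' senate.toList 0)]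
  rw [pvIdx_eq senate.toList 0]
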